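-- pv_equiv track=rewrite | github.com/Masonzton/Detective_Problem | helpers.py | get_murderous_atoms
-- ===== SOURCE A (Python) =====
-- from typing import List, Tuple
--
-- def get_murderous_atoms(atoms: List[int]) -> List[int]:
--     """Given a set of atoms determine exactly which atoms the murderer could be under.
--     Under the assumption that the witness does not speak with this interview combo"""
--     # an atom can be murderous if and only if there exists a witness atom such that
--     # the murderous atom completely covers it
--     murderous_atoms = []
--     for murder_atom in atoms:
--         for witness_atom in atoms:
--             if murder_atom == witness_atom:
--                 continue
--             if witness_atom & ~murder_atom == 0:
--                 murderous_atoms.append(murder_atom)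
--                 break
--
--     return murderous_atoms
-- ===== SOURCE B (Python) =====
-- from typing import List
--
--
-- def get_murderous_atoms(atoms: List[int]) -> List[int]:
--     """Bitwise-trie reformulation: insert the 34-bit two's-complement patterns of the
--     distinct atoms into a binary trie, then answer 'is there a distinct strict
--     submask of m?' by a pruned DFS over the trie instead of scanning the atoms."""
--     BITS = 34  # covers two's complement of every |v| <= 2**31 with a sign bit to spare
--
--     def bits(v):
--         return [(v >> i) & 1 for i in range(BITS - 1, -1, -1)]
--
--     def insert(t, bs):
--         if not bs:
--             return "LEAF"
--         if t is None:
--             t = [None, None]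
--         b = bs[0]
--         t[b] = insert(t[b], bs[1:])
--         return t
--
--     root = None
--     for v in dict.fromkeys(atoms):
--         root = insert(root, bits(v))
--
--     def search(t, bs, strict):
--         # is some stored pattern a submask of bs, differing from bs if not yet strict?
--         if t is None:
--             return False
--         if not bs:
--             return strict and t == "LEAF"
--         if bs[0] == 1:
--             return search(t[1], bs[1:], strict) or search(t[0], bs[1:], True)
--         return search(t[0], bs[1:], strict)
--
--     return [a for a in atoms if search(root, bits(a), False)]
-- ===== Notes on version B (the rewrite author's own statement) =====
-- stated objective: faster
-- what changed: A's inner scan over all atoms per atom is replaced by building a binary trie of the 34-bit two's-complement patterns of the distinct atoms and answering 'does a distinct strict submask exist?' by a pruned depth-first search of the trie.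
import Mathlib
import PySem

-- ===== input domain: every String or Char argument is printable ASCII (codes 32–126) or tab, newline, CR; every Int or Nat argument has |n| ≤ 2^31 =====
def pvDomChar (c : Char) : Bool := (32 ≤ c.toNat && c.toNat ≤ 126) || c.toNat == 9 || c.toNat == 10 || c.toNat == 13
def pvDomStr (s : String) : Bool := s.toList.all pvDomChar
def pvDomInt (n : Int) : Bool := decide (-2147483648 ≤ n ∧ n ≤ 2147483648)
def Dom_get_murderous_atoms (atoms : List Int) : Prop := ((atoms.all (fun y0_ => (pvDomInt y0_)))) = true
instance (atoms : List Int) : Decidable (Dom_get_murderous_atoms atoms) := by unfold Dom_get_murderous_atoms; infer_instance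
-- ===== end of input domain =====

-- B replaces A's nested scan over the atoms by a binary trie over the 34-bit
-- two's-complement patterns of the distinct atoms, queried by a pruned DFS (alternative algorithm).


-- ===== PORT A =====
-- inner `for witness_atom in atoms: …` with its `continue`/`break`
def pvInner (m : Int) : List Int → Bool
  | [] => false
  | w :: ws =>
    if m == w then pvInner m ws
    else if (PySem.Int.band w (Int.not m)) == 0 then true
    else pvInner m ws

def get_murderous_atoms (atoms : List Int) : List Int :=
  atoms.foldl (fun acc m => if pvInner m atoms then acc ++ [m] else acc) []

-- ===== PORT B =====
-- bits(v) = [(v >> i) & 1 for i in range(33, -1, -1)]  (the range values are ≥ 0, so `.toNat` is exact here)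
def pvBits (v : Int) : List Int :=
  (PySem.List.pyRange 33 (-1) (-1)).map (fun i => PySem.Int.band (v >>> i.toNat) 1)

-- Python's trie node: None = empty, "LEAF" = leaf, [child0, child1] = node
inductive PvTrie : Type where
  | empty : PvTrie
  | leaf : PvTrie
  | node : PvTrie → PvTrie → PvTrie
deriving DecidableEq, Repr

-- insert(t, bs); a `leaf` with nonempty bits never arises (all inserted patterns have
-- length 34), it is rendered like the fresh-node case
def pvInsert : PvTrie → List Int → PvTrie
  | _, [] => .leaf
  | .node z o, b :: rest =>
    if b == 1 then .node z (pvInsert o rest) else .node (pvInsert z rest) o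
  | _, b :: rest =>
    if b == 1 then .node .empty (pvInsert .empty rest) else .node (pvInsert .empty rest) .empty

-- search(t, bs, strict); `strict and t == "LEAF"` split over the trie constructors;
-- a `leaf` with nonempty bits never arises (uniform depth 34)
def pvSearch : PvTrie → List Int → Bool → Bool
  | .empty, _, _ => false
  | .leaf, [], strict => strict
  | .node _ _, [], _ => false
  | .leaf, _ :: _, _ => false
  | .node z o, b :: rest, strict =>
    if b == 1 then pvSearch o rest strict || pvSearch z rest true
    else pvSearch z rest strict

def get_murderous_atoms_alt (atoms : List Int) : List Int :=
  let root := (PySem.List.dedup atoms).foldl (fun t v => pvInsert t (pvBits v)) PvTrie.empty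
  atoms.filter (fun a => pvSearch root (pvBits a) false)

-- ===== PRECONDITION & SPEC =====
def Spec_get_murderous_atoms (atoms : List Int) (out : List Int) : Prop := out = get_murderous_atoms_alt atoms
instance (atoms : List Int) (out : List Int) : Decidable (Spec_get_murderous_atoms atoms out) := by unfold Spec_get_murderous_atoms; infer_instance

-- ===== CLAIM (what is proved, stated in full; the proofs are below) =====
def Claim_equal_get_murderous_atoms : Prop := ∀ (atoms : List Int), Dom_get_murderous_atoms atoms → Spec_get_murderous_atoms atoms (get_murderous_atoms atoms)

-- ===== LEMMAS AND PROOFS =====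

-- pointwise submask test on bit lists (a 1 may only sit where the other list has a 1)
def pvSub : List Int → List Int → Bool
  | [], [] => true
  | a :: as_, b :: bs => ((a != 1) || (b == 1)) && pvSub as_ bs
  | _, _ => false

-- the set of bit patterns stored in a trie
def pvHasPath : PvTrie → List Int → Bool
  | .leaf, [] => true
  | .node z o, c :: q => if c == 1 then pvHasPath o q else if c == 0 then pvHasPath z q else false
  | _, _ => false

-- all stored patterns have length n
def pvUniform : PvTrie → Nat → Bool
  | .empty, _ => true
  | .leaf, n => n == 0
  | .node _ _, 0 => false
  | .node z o, n + 1 => pvUniform z n && pvUniform o n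

def pvAll01 (bs : List Int) : Bool := bs.all (fun x => x == 0 || x == 1)

-- reference form of pvBits
def pvSpecBits (v : Int) : List Int :=
  ((List.range 34).reverse).map (fun i => if v.testBit i then 1 else 0)



theorem pv_mod_shift (v : Int) (i : Nat) :
    PySem.Int.mod (v >>> (i : Int)) 2 = if v.testBit i then 1 else 0 := by
  rw [Int.shiftRight_natCast_right]
  rw [PySem.Int.mod_eq_emod_of_pos (by norm_num)]
  cases v with
  | ofNat n =>
    show (Int.ofNat (n >>> i)) % 2 = if Nat.testBit n i then 1 else 0
    rw [Nat.testBit_eq_decide_div_mod_eq, Nat.shiftRight_eq_div_pow]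
    generalize n / 2^i = k
    rcases Nat.mod_two_eq_zero_or_one k with h | h <;> simp only [h, Int.ofNat_eq_natCast] <;> norm_num <;> omega
  | negSucc n =>
    show (Int.negSucc (n >>> i)) % 2 = if !(Nat.testBit n i) then 1 else 0
    rw [Nat.testBit_eq_decide_div_mod_eq, Nat.shiftRight_eq_div_pow, Int.negSucc_eq]
    generalize n / 2^i = k
    rcases Nat.mod_two_eq_zero_or_one k with h | h <;> simp only [h] <;> norm_num <;> omega

theorem pv_bits_eq (v : Int) : pvBits v = pvSpecBits v := by
  have hr : PySem.List.pyRange 33 (-1) (-1) = ((List.range 34).reverse).map (fun n : Nat => (n : Int)) := by decide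
  unfold pvBits pvSpecBits
  rw [hr, List.map_map]
  refine List.map_congr_left ?_
  intro i _
  simp only [Function.comp_apply, Int.toNat_natCast, PySem.Int.band_one, pv_mod_shift]
  rfl

theorem pv_bits_all01 (v : Int) : pvAll01 (pvSpecBits v) = true := by
  unfold pvAll01 pvSpecBits
  rw [List.all_eq_true]
  intro x hx
  simp only [List.mem_map] at hx
  obtain ⟨i, -, rfl⟩ := hx
  by_cases h : v.testBit i <;> simp [h]

theorem pv_bits_length (v : Int) : (pvSpecBits v).length = 34 := by
  simp [pvSpecBits]

theorem pv_search_spec (bs : List Int) (t : PvTrie) (strict : Bool) (h01 : pvAll01 bs = true) :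
    pvSearch t bs strict = true ↔
      ∃ p, pvHasPath t p = true ∧ pvSub p bs = true ∧ (strict = true ∨ p ≠ bs) := by
  induction bs generalizing t strict with
  | nil =>
    cases t with
    | empty => simp [pvSearch, pvHasPath]
    | leaf =>
      simp only [pvSearch]
      constructor
      · intro h; exact ⟨[], rfl, rfl, Or.inl h⟩
      · rintro ⟨p, hp, hsub, hc⟩
        cases p with
        | nil => rcases hc with h | h; exact h; exact absurd rfl h
        | cons c q => simp [pvHasPath] at hp
    | node z o =>
      simp only [pvSearch, Bool.false_eq_true, false_iff]
      rintro ⟨p, hp, hsub, -⟩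
      cases p with
      | nil => simp [pvHasPath] at hp
      | cons c q => simp [pvSub] at hsub
  | cons b rest ih =>
    have h01' : pvAll01 rest = true := by
      simp only [pvAll01, List.all_cons, Bool.and_eq_true] at h01; exact h01.2
    have hb : b = 0 ∨ b = 1 := by
      simp only [pvAll01, List.all_cons, Bool.and_eq_true, Bool.or_eq_true, beq_iff_eq] at h01
      exact h01.1
    cases t with
    | empty =>
      simp only [pvSearch, Bool.false_eq_true, false_iff]
      rintro ⟨p, hp, -, -⟩; cases p <;> simp [pvHasPath] at hp
    | leaf =>
      simp only [pvSearch, Bool.false_eq_true, false_iff]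
      rintro ⟨p, hp, hsub, -⟩
      cases p with
      | nil => simp [pvSub] at hsub
      | cons c q => simp [pvHasPath] at hp
    | node z o =>
      simp only [pvSearch]
      rcases hb with rfl | rfl
      · -- b = 0
        rw [if_neg (by decide), ih z strict h01']
        constructor
        · rintro ⟨q, hq, hsub, hc⟩
          refine ⟨0 :: q, by simpa [pvHasPath] using hq, by simpa [pvSub] using hsub, ?_⟩
          rcases hc with h | h
          · exact Or.inl h
          · exact Or.inr (by simpa using h)
        · rintro ⟨p, hp, hsub, hc⟩
          cases p with
          | nil => simp [pvHasPath] at hp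
          | cons c q =>
            have hsub' : (c != 1) = true ∧ pvSub q rest = true := by
              simpa [pvSub] using hsub
            have hc1 : ¬ (c = 1) := by simpa using hsub'.1
            have hc0 : c = 0 := by
              by_contra hc0
              simp [pvHasPath, hc1, hc0] at hp
            subst hc0
            refine ⟨q, by simpa [pvHasPath] using hp, hsub'.2, ?_⟩
            rcases hc with h | h
            · exact Or.inl h
            · exact Or.inr (fun hq => h (by rw [hq]))
      · -- b = 1
        rw [if_pos (by decide)]
        rw [Bool.or_eq_true, ih o strict h01', ih z true h01']
        constructor
        · rintro (⟨q, hq, hsub, hc⟩ | ⟨q, hq, hsub, -⟩)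
          · refine ⟨1 :: q, by simpa [pvHasPath] using hq, by simpa [pvSub] using hsub, ?_⟩
            rcases hc with h | h
            · exact Or.inl h
            · exact Or.inr (by simpa using h)
          · exact ⟨0 :: q, by simpa [pvHasPath] using hq, by simpa [pvSub] using hsub,
              Or.inr (by simp)⟩
        · rintro ⟨p, hp, hsub, hc⟩
          cases p with
          | nil => simp [pvHasPath] at hp
          | cons c q =>
            have hsub' : pvSub q rest = true := by
              rcases (by simpa [pvSub] using hsub : ((c != 1) || true) = true ∧ pvSub q rest = true) with ⟨-, h⟩
              exact h
            by_cases hc1 : c = 1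
            · subst hc1
              refine Or.inl ⟨q, by simpa [pvHasPath] using hp, hsub', ?_⟩
              rcases hc with h | h
              · exact Or.inl h
              · exact Or.inr (fun hq => h (by rw [hq]))
            · have hc0 : c = 0 := by
                by_contra hc0
                simp [pvHasPath, hc1, hc0] at hp
              subst hc0
              exact Or.inr ⟨q, by simpa [pvHasPath] using hp, hsub', Or.inl rfl⟩

theorem pv_insert_uniform (p : List Int) (t : PvTrie) (n : Nat)
    (ht : pvUniform t n = true) (hl : p.length = n) :
    pvUniform (pvInsert t p) n = true := by
  induction p generalizing t n with
  | nil => simp at hl; subst hl; simp [pvInsert, pvUniform]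
  | cons b rest ih =>
    obtain ⟨k, rfl⟩ : ∃ k, n = k + 1 := ⟨rest.length, by simpa using hl.symm⟩
    have hlr : rest.length = k := by simpa using hl
    cases t with
    | empty =>
      simp only [pvInsert]
      split_ifs <;> simp [pvUniform, ih PvTrie.empty k (by simp [pvUniform]) hlr]
    | leaf => simp [pvUniform] at ht
    | node z o =>
      simp only [pvUniform, Bool.and_eq_true] at ht
      simp only [pvInsert]
      split_ifs <;> simp [pvUniform, ht.1, ht.2, ih z k ht.1 hlr, ih o k ht.2 hlr]

theorem pv_insert_hasPath (p : List Int) (t : PvTrie) (n : Nat) (q : List Int)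
    (ht : pvUniform t n = true) (hl : p.length = n) (h01 : pvAll01 p = true) :
    (pvHasPath (pvInsert t p) q = true ↔ (q = p ∨ pvHasPath t q = true)) := by
  induction p generalizing t n q with
  | nil =>
    simp at hl; subst hl
    simp only [pvInsert]
    cases t with
    | empty =>
      cases q <;> simp [pvHasPath]
    | leaf => cases q <;> simp [pvHasPath]
    | node z o => simp [pvUniform] at ht
  | cons b rest ih =>
    obtain ⟨k, rfl⟩ : ∃ k, n = k + 1 := ⟨rest.length, by simpa using hl.symm⟩
    have hlr : rest.length = k := by simpa using hl
    have h01r : pvAll01 rest = true := by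
      simp only [pvAll01, List.all_cons, Bool.and_eq_true] at h01; exact h01.2
    have hb : b = 0 ∨ b = 1 := by
      simp only [pvAll01, List.all_cons, Bool.and_eq_true, Bool.or_eq_true, beq_iff_eq] at h01
      exact h01.1
    have hemp : pvUniform PvTrie.empty k = true := by simp [pvUniform]
    cases t with
    | empty =>
      simp only [pvInsert]
      rcases hb with rfl | rfl
      · rw [if_neg (by decide)]
        cases q with
        | nil => simp [pvHasPath]
        | cons c q' =>
          have hz := ih PvTrie.empty k q' hemp hlr h01r
          by_cases hc1 : c = 1
          · subst hc1; simp [pvHasPath]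
          · by_cases hc0 : c = 0 <;> simp [pvHasPath, hc1, hc0, hz]
      · rw [if_pos (by decide)]
        cases q with
        | nil => simp [pvHasPath]
        | cons c q' =>
          have hz := ih PvTrie.empty k q' hemp hlr h01r
          by_cases hc1 : c = 1
          · subst hc1; simp [pvHasPath, hz]
          · by_cases hc0 : c = 0 <;> simp [pvHasPath, hc1, hc0]
    | leaf => simp [pvUniform] at ht
    | node z o =>
      simp only [pvUniform, Bool.and_eq_true] at ht
      simp only [pvInsert]
      rcases hb with rfl | rfl
      · rw [if_neg (by decide)]
        cases q with
        | nil => simp [pvHasPath]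
        | cons c q' =>
          have hz := ih z k q' ht.1 hlr h01r
          by_cases hc1 : c = 1
          · subst hc1; simp [pvHasPath]
          · by_cases hc0 : c = 0 <;> simp [pvHasPath, hc1, hc0, hz]
      · rw [if_pos (by decide)]
        cases q with
        | nil => simp [pvHasPath]
        | cons c q' =>
          have ho := ih o k q' ht.2 hlr h01r
          by_cases hc1 : c = 1
          · subst hc1; simp [pvHasPath, ho]
          · by_cases hc0 : c = 0 <;> simp [pvHasPath, hc1, hc0]

theorem pv_root_hasPath (vs : List Int) (t : PvTrie) (q : List Int)
    (ht : pvUniform t 34 = true) :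
    (pvHasPath (vs.foldl (fun t v => pvInsert t (pvBits v)) t) q = true ↔
      ((∃ v ∈ vs, q = pvSpecBits v) ∨ pvHasPath t q = true)) := by
  induction vs generalizing t with
  | nil => simp
  | cons v vs ih =>
    have hlen : (pvBits v).length = 34 := by rw [pv_bits_eq]; exact pv_bits_length v
    have h01 : pvAll01 (pvBits v) = true := by rw [pv_bits_eq]; exact pv_bits_all01 v
    have ht' : pvUniform (pvInsert t (pvBits v)) 34 = true := pv_insert_uniform _ _ _ ht hlen
    simp only [List.foldl_cons]
    rw [ih _ ht', pv_insert_hasPath _ _ 34 _ ht hlen h01, pv_bits_eq]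
    constructor
    · rintro (⟨w, hw, rfl⟩ | h | h)
      · exact Or.inl ⟨w, by simp [hw]⟩
      · exact Or.inl ⟨v, by simp [h]⟩
      · exact Or.inr h
    · rintro (⟨w, hw, rfl⟩ | h)
      · rcases List.mem_cons.mp hw with rfl | hw
        · exact Or.inr (Or.inl rfl)
        · exact Or.inl ⟨w, hw, rfl⟩
      · exact Or.inr (Or.inr h)

-- Nat submask helper: m &&& n = m ↔ every bit of m is in n
theorem pv_nat_submask (m n : Nat) : m &&& n = m ↔ ∀ i, m.testBit i = true → n.testBit i = true := by
  constructor
  · intro h i hi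
    have h2 : (m.testBit i && n.testBit i) = m.testBit i := by rw [← Nat.testBit_and, h]
    rw [hi] at h2; simpa using h2
  · intro h
    apply Nat.eq_of_testBit_eq
    intro i
    rw [Nat.testBit_and]
    by_cases hm : m.testBit i
    · simp [hm, h i hm]
    · simp [hm]

theorem pv_nat_and_zero (m n : Nat) : m &&& n = 0 ↔ ∀ i, m.testBit i = true → n.testBit i = false := by
  constructor
  · intro h i hi
    have h2 : (m.testBit i && n.testBit i) = false := by rw [← Nat.testBit_and, h, Nat.zero_testBit]
    rw [hi] at h2; simpa using h2
  · intro h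
    apply Nat.eq_of_testBit_eq
    intro i
    rw [Nat.testBit_and, Nat.zero_testBit]
    by_cases hm : m.testBit i
    · simp [hm, h i hm]
    · simp [hm]

theorem pv_ofNat_eq_zero (x : Nat) : Int.ofNat x = 0 ↔ x = 0 := by
  rw [Int.ofNat_eq_natCast, Int.natCast_eq_zero]

theorem pv_band_not_zero_iff (w m : Int) :
    (PySem.Int.band w (Int.not m) = 0 ↔ ∀ i, w.testBit i = true → m.testBit i = true) := by
  cases m with
  | ofNat M =>
    have hnm : Int.not (Int.ofNat M) = Int.negSucc M := rfl
    rw [hnm]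
    cases w with
    | ofNat W =>
      have hband : PySem.Int.band (Int.ofNat W) (Int.negSucc M) = Int.ofNat (W - (W &&& M)) := by
        simp only [PySem.Int.band]
        rw [if_pos (by exact Int.natCast_nonneg W), if_neg (by exact of_decide_eq_false rfl)]
        norm_num [Int.negSucc_eq]
      rw [hband]
      rw [pv_ofNat_eq_zero]
      have hle : W &&& M ≤ W := Nat.and_le_left
      have : W - (W &&& M) = 0 ↔ W &&& M = W := by omega
      rw [this, pv_nat_submask]
      constructor
      · intro h i hi; exact h i hi
      · intro h i hi; exact h i hi
    | negSucc A =>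
      have hband : PySem.Int.band (Int.negSucc A) (Int.negSucc M) = -(Int.ofNat (A ||| M)) - 1 := by
        simp only [PySem.Int.band]
        rw [if_neg (by exact of_decide_eq_false rfl), if_neg (by exact of_decide_eq_false rfl)]
        norm_num [Int.negSucc_eq]
      rw [hband]
      constructor
      · intro h
        exfalso
        rw [Int.ofNat_eq_natCast] at h
        omega
      · intro h
        exfalso
        have hi := h (A + M)
        have hA : A.testBit (A + M) = false :=
          Nat.testBit_lt_two_pow (lt_of_lt_of_le (Nat.lt_two_pow_self) (Nat.pow_le_pow_right (by norm_num) (by omega)))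
        have hM : M.testBit (A + M) = false :=
          Nat.testBit_lt_two_pow (lt_of_lt_of_le (Nat.lt_two_pow_self) (Nat.pow_le_pow_right (by norm_num) (by omega)))
        simp [Int.testBit, hA, hM] at hi
  | negSucc M' =>
    have hnm : Int.not (Int.negSucc M') = Int.ofNat M' := rfl
    rw [hnm]
    cases w with
    | ofNat W =>
      have hband : PySem.Int.band (Int.ofNat W) (Int.ofNat M') = Int.ofNat (W &&& M') := by
        simp only [PySem.Int.band]
        rw [if_pos (by exact Int.natCast_nonneg W), if_pos (by exact Int.natCast_nonneg M')]
        norm_num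
      rw [hband]
      rw [pv_ofNat_eq_zero, pv_nat_and_zero]
      simp only [Int.testBit]
      constructor
      · intro h i hi; rw [h i hi]; rfl
      · intro h i hi; have := h i hi; simpa using this
    | negSucc A =>
      have hband : PySem.Int.band (Int.negSucc A) (Int.ofNat M') = Int.ofNat (M' - (M' &&& A)) := by
        simp only [PySem.Int.band]
        rw [if_neg (by exact of_decide_eq_false rfl), if_pos (by exact Int.natCast_nonneg M')]
        norm_num [Int.negSucc_eq]
      rw [hband]
      have h0 := pv_ofNat_eq_zero (M' - (M' &&& A))
      have hle : M' &&& A ≤ M' := Nat.and_le_left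
      have h1 : M' - (M' &&& A) = 0 ↔ M' &&& A = M' := by omega
      rw [h0, h1, pv_nat_submask]
      simp only [Int.testBit]
      constructor
      · intro h i hi
        by_cases hA : A.testBit i
        · simp [hA] at hi
        · by_contra hM
          simp only [Bool.not_eq_true] at hM
          have := h i (by simpa using hM)
          simp [hA] at this
      · intro h i hi
        by_contra hA
        have := h i (by simp [hA])
        simp [hi] at this


theorem pv_testBit_hi (v : Int) (hv : pvDomInt v = true) (i : Nat) (hi : 33 ≤ i) :
    v.testBit i = decide (v < 0) := by
  have h2 : (2147483648 : Nat) < 2 ^ i :=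
    lt_of_lt_of_le (by norm_num) (Nat.pow_le_pow_right (by norm_num) hi)
  simp only [pvDomInt, decide_eq_true_eq] at hv
  cases v with
  | ofNat n =>
    simp only [Int.ofNat_eq_natCast] at hv
    have hn : n < 2 ^ i := by omega
    have hpos : ¬ ((n : Int) < 0) := by omega
    simp [Int.testBit, Nat.testBit_lt_two_pow hn, hpos]
  | negSucc n =>
    rw [Int.negSucc_eq] at hv
    have hn : n < 2 ^ i := by omega
    simp [Int.testBit, Nat.testBit_lt_two_pow hn, Int.negSucc_eq]
    omega

theorem pv_sub_spec (w m : Int) :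
    pvSub (pvSpecBits w) (pvSpecBits m) = true ↔
      ∀ i < 34, w.testBit i = true → m.testBit i = true := by
  have key : ∀ l : List Nat,
      (pvSub (l.map (fun i => if w.testBit i then 1 else 0)) (l.map (fun i => if m.testBit i then 1 else 0)) = true
        ↔ ∀ i ∈ l, w.testBit i = true → m.testBit i = true) := by
    intro l
    induction l with
    | nil => simp [pvSub]
    | cons i l ihl =>
      simp only [List.map_cons, pvSub, Bool.and_eq_true, ihl, List.mem_cons]
      constructor
      · rintro ⟨h1, h2⟩ j hj hw
        rcases hj with rfl | hj
        · by_cases hm : m.testBit j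
          · exact hm
          · simp [hw, hm] at h1
        · exact h2 j hj hw
      · intro h
        constructor
        · by_cases hw : w.testBit i
          · simp [hw, h i (Or.inl rfl) hw]
          · simp [hw]
        · exact fun j hj => h j (Or.inr hj)
  unfold pvSpecBits
  rw [key]
  constructor
  · intro h i hi; exact h i (by simpa using hi)
  · intro h i hi; exact h i (by simpa using hi)

theorem pv_bits_inj (w m : Int) (hw : pvDomInt w = true) (hm : pvDomInt m = true)
    (h : pvSpecBits w = pvSpecBits m) : w = m := by
  have hlow : ∀ i < 34, w.testBit i = m.testBit i := by
    intro i hi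
    have := congrArg (fun l => l[33 - i]?) h
    simp only [pvSpecBits] at this
    rw [List.getElem?_map, List.getElem?_map] at this
    have hge : (List.range 34).reverse[33-i]? = some i := by
      rw [List.getElem?_reverse (by simp; omega)]
      simp only [List.length_range]
      rw [List.getElem?_range (by omega)]
      congr 1
      omega
    rw [hge] at this
    have this2 : (if w.testBit i then (1:Int) else 0) = if m.testBit i then 1 else 0 := by
      simpa using this
    cases hb1 : w.testBit i <;> cases hb2 : m.testBit i <;>
      rw [hb1, hb2] at this2 <;> norm_num at this2
  have hall : ∀ i, w.testBit i = m.testBit i := by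
    intro i
    by_cases hi : i < 34
    · exact hlow i hi
    · rw [pv_testBit_hi w hw i (by omega), pv_testBit_hi m hm i (by omega)]
      have h33 := hlow 33 (by omega)
      rw [pv_testBit_hi w hw 33 (by omega), pv_testBit_hi m hm 33 (by omega)] at h33
      exact h33
  -- extensionality over Int
  cases w with
  | ofNat a =>
    cases m with
    | ofNat b =>
      have : a = b := Nat.eq_of_testBit_eq (fun i => by have := hall i; simpa [Int.testBit] using this)
      rw [this]
    | negSucc b =>
      exfalso
      have h1 := hall (a + b + 34)
      have hA : a.testBit (a + b + 34) = false :=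
        Nat.testBit_lt_two_pow (lt_of_lt_of_le (Nat.lt_two_pow_self) (Nat.pow_le_pow_right (by norm_num) (by omega)))
      have hB : b.testBit (a + b + 34) = false :=
        Nat.testBit_lt_two_pow (lt_of_lt_of_le (Nat.lt_two_pow_self) (Nat.pow_le_pow_right (by norm_num) (by omega)))
      simp [Int.testBit, hA, hB] at h1
  | negSucc a =>
    cases m with
    | ofNat b =>
      exfalso
      have h1 := hall (a + b + 34)
      have hA : a.testBit (a + b + 34) = false :=
        Nat.testBit_lt_two_pow (lt_of_lt_of_le (Nat.lt_two_pow_self) (Nat.pow_le_pow_right (by norm_num) (by omega)))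
      have hB : b.testBit (a + b + 34) = false :=
        Nat.testBit_lt_two_pow (lt_of_lt_of_le (Nat.lt_two_pow_self) (Nat.pow_le_pow_right (by norm_num) (by omega)))
      simp [Int.testBit, hA, hB] at h1
    | negSucc b =>
      have : a = b := Nat.eq_of_testBit_eq (fun i => by
        have := hall i
        simpa [Int.testBit] using this)
      rw [this]

theorem pv_band_iff_bits (w m : Int) (hw : pvDomInt w = true) (hm : pvDomInt m = true) :
    (PySem.Int.band w (Int.not m) = 0 ↔ ∀ i < 34, w.testBit i = true → m.testBit i = true) := by
  rw [pv_band_not_zero_iff]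
  constructor
  · intro h i _ hi; exact h i hi
  · intro h i hi
    by_cases hlt : i < 34
    · exact h i hlt hi
    · rw [pv_testBit_hi w hw i (by omega)] at hi
      have hw33 : w.testBit 33 = true := by rw [pv_testBit_hi w hw 33 (by omega)]; exact hi
      have hm33 := h 33 (by omega) hw33
      rw [pv_testBit_hi m hm 33 (by omega)] at hm33
      rw [pv_testBit_hi m hm i (by omega)]
      exact hm33


theorem pvInner_eq_any (m : Int) (l : List Int) :
    pvInner m l = l.any (fun w => !(m == w) && ((PySem.Int.band w (Int.not m)) == 0)) := by
  induction l with
  | nil => rfl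
  | cons w ws ih =>
    simp only [pvInner, List.any_cons]
    by_cases h : m = w
    · subst h; simp [ih]
    · simp only [beq_iff_eq, if_neg h]
      split_ifs with h2
      · simp [h, h2]
      · simp [h, h2, ih]

-- ===== VERDICT (by name: the statement is the Claim_ definition above) =====
theorem get_murderous_atoms_spec : Claim_equal_get_murderous_atoms := by
  intro atoms hdom
  show get_murderous_atoms atoms = get_murderous_atoms_alt atoms
  have hdom' : ∀ x ∈ atoms, pvDomInt x = true := fun x hx => List.all_eq_true.mp hdom x hx
  unfold get_murderous_atoms get_murderous_atoms_alt
  rw [PySem.List.foldl_append_if_eq_filter, List.nil_append]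
  apply List.filter_congr
  intro a ha
  have hda := hdom' a ha
  have huni : pvUniform PvTrie.empty 34 = true := by simp [pvUniform]
  rw [pvInner_eq_any, Bool.eq_iff_iff]
  simp only [List.any_eq_true, Bool.and_eq_true, Bool.not_eq_true', beq_eq_false_iff_ne, beq_iff_eq]
  rw [pv_search_spec _ _ _ (by rw [pv_bits_eq]; exact pv_bits_all01 a)]
  constructor
  · rintro ⟨w, hw, hne, hz⟩
    have hdw := hdom' w hw
    refine ⟨pvSpecBits w, ?_, ?_, Or.inr ?_⟩
    · rw [pv_root_hasPath _ _ _ huni]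
      exact Or.inl ⟨w, (PySem.List.mem_dedup atoms w).mpr hw, rfl⟩
    · rw [pv_bits_eq]
      exact (pv_sub_spec w a).mpr (fun i hi => ((pv_band_iff_bits w a hdw hda).mp hz) i hi)
    · rw [pv_bits_eq]
      intro hEq
      exact hne (pv_bits_inj w a hdw hda hEq).symm
  · rintro ⟨p, hp, hsub, hc⟩
    rw [pv_root_hasPath _ _ _ huni] at hp
    rcases hp with ⟨w, hw, rfl⟩ | hfalse
    · have hwa : w ∈ atoms := (PySem.List.mem_dedup atoms w).mp hw
      have hdw := hdom' w hwa
      refine ⟨w, hwa, ?_, ?_⟩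
      · rcases hc with h | h
        · cases h
        · intro hEq
          exact h (by rw [pv_bits_eq, hEq])
      · exact (pv_band_iff_bits w a hdw hda).mpr ((pv_sub_spec w a).mp (by rwa [pv_bits_eq] at hsub))
    · cases p <;> simp [pvHasPath] at hfalse
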